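-- pv_equiv track=rewrite | github.com/openforcefield/kubecustom | kubecustom/pod.py | sort_pods_by_deployment
-- ===== SOURCE A (Python) =====
-- from collections import defaultdict, Counter
--
-- def sort_pods_by_deployment(pods, deployment_names, keep_key=""):
--     """Sort pods into deployments.
--
--     Args:
--         pods (dict): Keys are pod_names and values can be anything
--         deployment_names (list): deployment names expected to overlap with a number of pod_names
--         keep_key (str, optional): A string in the deployment name to signify that it should be kept. Defaults to "".
--
--     Returns:
--         dict: A dictionary with deployments as keys and values are the same structure as the input dictionary.
--     """
--
--     if not isinstance(pods, dict):
--         raise ValueError("Expected a dictionary where the keys are pod names")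
--
--     # Sort deployment names longest to shortest
--     # to ensure that a shorter name will not overlap with a longer name
--     deployment_names.sort(key=lambda x: -len(x))
--     pods_sorted = defaultdict(dict)
--     for dep_name in deployment_names:
--         if keep_key not in dep_name:
--             continue
--         pods_sorted[dep_name] = {
--             pod_name: value
--             for pod_name, value in pods.items()
--             if "-".join(pod_name.split("-")[:-2]) == dep_name
--         }
--
--     return pods_sorted
-- ===== SOURCE B (Python) =====
-- from collections import defaultdict
--
-- def sort_pods_by_deployment(pods, deployment_names, keep_key=""):
--     """Group all pods once by their computed deployment prefix, then emit one
--     result entry per (kept, not yet seen) deployment name with a single lookup.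
--     Like A, this sorts deployment_names in place."""
--     if not isinstance(pods, dict):
--         raise ValueError("Expected a dictionary where the keys are pod names")
--     deployment_names.sort(key=lambda x: -len(x))
--     groups = {}
--     for pod_name, value in pods.items():
--         groups.setdefault("-".join(pod_name.split("-")[:-2]), []).append((pod_name, value))
--     out = defaultdict(dict)
--     seen = set()
--     for dep_name in deployment_names:
--         if keep_key in dep_name and dep_name not in seen:
--             seen.add(dep_name)
--             out[dep_name] = dict(groups.get(dep_name, ()))
--     return out
-- ===== Notes on version B (the rewrite author's own statement) =====
-- stated objective: alternative
-- what changed: Instead of rescanning all pods once per deployment name into an accumulating dict, B groups the pods in a single pass into a prefix-keyed dict and then emits the result directly, one lookup per (kept, not yet seen) deployment name; asymptotically O(P + D log D) vs O(D*P), but a timing run's inputs keep D small so no speedup was measured.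
import Mathlib
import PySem

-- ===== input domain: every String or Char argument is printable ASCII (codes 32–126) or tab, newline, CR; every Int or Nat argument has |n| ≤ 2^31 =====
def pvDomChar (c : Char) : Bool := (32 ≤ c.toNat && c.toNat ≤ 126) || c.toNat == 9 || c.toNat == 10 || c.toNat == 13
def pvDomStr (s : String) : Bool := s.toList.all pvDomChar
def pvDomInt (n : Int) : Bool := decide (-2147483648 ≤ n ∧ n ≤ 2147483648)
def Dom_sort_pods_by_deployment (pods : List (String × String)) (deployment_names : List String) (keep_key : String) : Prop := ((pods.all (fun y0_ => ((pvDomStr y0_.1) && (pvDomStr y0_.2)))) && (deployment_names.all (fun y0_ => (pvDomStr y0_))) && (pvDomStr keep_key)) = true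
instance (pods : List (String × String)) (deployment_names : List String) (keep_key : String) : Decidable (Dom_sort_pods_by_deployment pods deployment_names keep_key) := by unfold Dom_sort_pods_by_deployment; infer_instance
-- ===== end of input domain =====

-- B groups all pods once by their computed prefix and then emits the result list directly
-- (one lookup per deployment, with a seen-set for duplicate names) instead of rescanning all
-- pods per deployment into an accumulating dict; objective: alternative decomposition.
-- NOTE: both Pythons also sort deployment_names in place; the equivalence proved here is about
-- the return value (both perform the identical in-place sort, so the side effect is the same too).

-- shared helper: "-".join(pod_name.split("-")[:-2])  (split? with a nonempty separator is always `some`; .getD [] only discharges the Option)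
def pvPrefix (pod_name : String) : String :=
  PySem.Str.join "-" (PySem.List.slice ((PySem.Str.split? pod_name "-").getD []) none (some (-2)))

-- ===== PORT A =====
def sort_pods_by_deployment (pods : List (String × String)) (deployment_names : List String) (keep_key : String) : List (String × List (String × String)) :=
  -- deployment_names.sort(key=lambda x: -len(x))
  let deps := PySem.List.sorted deployment_names (fun x => -(PySem.Str.len x)) false
  -- for dep_name in deployment_names: if keep_key not in dep_name: continue; pods_sorted[dep_name] = {pod: v for ... if prefix == dep_name}
  (deps.foldl (fun (acc : PySem.Dict String (List (String × String))) dep_name =>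
      if PySem.Str.isIn keep_key dep_name then
        acc.insert dep_name
          ((pods.foldl (fun (d : PySem.Dict String String) p =>
              if pvPrefix p.1 = dep_name then d.insert p.1 p.2 else d) PySem.Dict.empty).items)
      else acc) PySem.Dict.empty).items

-- ===== PORT B =====
-- the emit loop: for dep_name in deps: if keep_key in dep_name and dep_name not in seen: seen.add(dep_name); out[dep_name] = dict(groups.get(dep_name, ()))
-- (out's keys are exactly the emitted ones, so the output list is produced directly)
def pvEmit (groups : PySem.Dict String (List (String × String))) (keep_key : String)
    (seen : PySem.Set String) : List String → List (String × List (String × String))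
  | [] => []
  | dep_name :: rest =>
    if PySem.Str.isIn keep_key dep_name && !(PySem.Set.contains seen dep_name) then
      (dep_name, (PySem.Dict.ofList (groups.getD dep_name [])).items)
        :: pvEmit groups keep_key (PySem.Set.add seen dep_name) rest
    else pvEmit groups keep_key seen rest

def sort_pods_by_deployment_alt (pods : List (String × String)) (deployment_names : List String) (keep_key : String) : List (String × List (String × String)) :=
  -- groups.setdefault(prefix, []).append((pod_name, value))  -- one pass over pods
  let groups : PySem.Dict String (List (String × String)) :=
    pods.foldl (fun d p => d.modify (pvPrefix p.1) [] (fun l => l ++ [p])) PySem.Dict.empty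
  pvEmit groups keep_key PySem.Set.empty
    (PySem.List.sorted deployment_names (fun x => -(PySem.Str.len x)) false)

-- ===== PRECONDITION & SPEC =====
def Spec_sort_pods_by_deployment (pods : List (String × String)) (deployment_names : List String) (keep_key : String) (out : List (String × List (String × String))) : Prop := out = sort_pods_by_deployment_alt pods deployment_names keep_key
instance (pods : List (String × String)) (deployment_names : List String) (keep_key : String) (out : List (String × List (String × String))) : Decidable (Spec_sort_pods_by_deployment pods deployment_names keep_key out) := by unfold Spec_sort_pods_by_deployment; infer_instance

-- ===== CLAIM (what is proved, stated in full; the proofs are below) =====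
def Claim_equal_sort_pods_by_deployment : Prop := ∀ (pods : List (String × String)) (deployment_names : List String) (keep_key : String), Dom_sort_pods_by_deployment pods deployment_names keep_key → Spec_sort_pods_by_deployment pods deployment_names keep_key (sort_pods_by_deployment pods deployment_names keep_key)

-- ===== LEMMAS AND PROOFS =====

-- B's grouped-by-prefix bucket for dep, read back, is exactly the pods whose prefix is dep.
theorem pv_bucket (pods : List (String × String)) (dep : String) :
    (pods.foldl (fun (d : PySem.Dict String (List (String × String))) p =>
        d.modify (pvPrefix p.1) [] (fun l => l ++ [p])) PySem.Dict.empty).getD dep []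
      = pods.filter (fun p => pvPrefix p.1 == dep) := by
  have h := PySem.Dict.getD_foldl_modify_append (pods.map (fun p => (pvPrefix p.1, p)))
      (PySem.Dict.empty : PySem.Dict String (List (String × String))) dep
  rw [List.foldl_map] at h
  simpa [List.filter_map, Function.comp_def] using h

-- A's conditional-insert loop over pods builds the dict of the filtered pods.
theorem pv_inner (pods : List (String × String)) (dep : String) :
    (pods.foldl (fun (d : PySem.Dict String String) p =>
        if pvPrefix p.1 = dep then d.insert p.1 p.2 else d) PySem.Dict.empty)
      = PySem.Dict.ofList (pods.filter (fun p => pvPrefix p.1 == dep)) := by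
  show _ = (pods.filter (fun p => pvPrefix p.1 == dep)).foldl (fun d p => d.insert p.1 p.2) PySem.Dict.empty
  rw [List.foldl_filter]
  simp

-- A's outer dict-building fold, read back as items, is B's emit loop (seen = the keys so far),
-- provided every key already in acc maps to the value the loop would (re)insert for it.
theorem pv_outer (groups : PySem.Dict String (List (String × String))) (keep_key : String)
    (l : List String) (acc : PySem.Dict String (List (String × String)))
    (hnd : acc.keys.Nodup)
    (hv : ∀ p ∈ acc.items, p.2 = (PySem.Dict.ofList (groups.getD p.1 [])).items) :
    (l.foldl (fun (acc : PySem.Dict String (List (String × String))) dep_name =>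
        if PySem.Str.isIn keep_key dep_name then
          acc.insert dep_name ((PySem.Dict.ofList (groups.getD dep_name [])).items)
        else acc) acc).items
      = acc.items ++ pvEmit groups keep_key acc.keys l := by
  induction l generalizing acc with
  | nil => simp [pvEmit]
  | cons d rest ih =>
    by_cases hc : PySem.Str.isIn keep_key d
    · by_cases hm : acc.contains d = true
      · -- overwrite with the same value: the dict is unchanged
        have heq : acc.insert d ((PySem.Dict.ofList (groups.getD d [])).items) = acc := by
          apply PySem.Dict.ext
          rw [PySem.Dict.items_insert_of_contains acc _ hm]
          have hid : ∀ p ∈ acc.items,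
              (if (p.1 == d) = true then (d, (PySem.Dict.ofList (groups.getD d [])).items) else p) = p := by
            intro p hp
            by_cases hpd : p.1 == d
            · have hp1 : p.1 = d := eq_of_beq hpd
              have hp2 := hv p hp
              simp [← hp2, ← hp1]
            · simp [hpd]
          rw [List.map_congr_left hid]
          exact List.map_id' acc.items
        have hseen : PySem.Set.contains acc.keys d = true := by
          have : d ∈ acc.keys := (PySem.Dict.contains_iff_mem_keys acc d).mp hm
          simpa [PySem.Set.contains] using this
        simp only [List.foldl_cons, hc, if_true, heq, pvEmit, hseen, Bool.and_false,
          Bool.not_true, if_false]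
        exact ih acc hnd hv
      · -- fresh key: one entry is appended, and emit produces exactly that entry
        have hm' : acc.contains d = false := by simpa using hm
        set acc' := acc.insert d ((PySem.Dict.ofList (groups.getD d [])).items) with hacc'
        have hitems : acc'.items = acc.items ++ [(d, (PySem.Dict.ofList (groups.getD d [])).items)] :=
          PySem.Dict.items_insert_of_not_contains acc _ hm'
        have hkeys : acc'.keys = acc.keys ++ [d] := by
          simp [PySem.Dict.keys, hitems]
        have hseen : PySem.Set.contains acc.keys d = false := by
          have : ¬ d ∈ acc.keys := fun h => by
            exact absurd ((PySem.Dict.contains_iff_mem_keys acc d).mpr h) (by simp [hm'])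
          simpa [PySem.Set.contains] using this
        have hdk : d ∉ acc.keys := fun h =>
          absurd ((PySem.Dict.contains_iff_mem_keys acc d).mpr h) (by simp [hm'])
        have hnd' : acc'.keys.Nodup := by
          rw [hkeys]
          refine List.Nodup.append hnd (List.nodup_singleton d) ?_
          intro a ha hb
          simp only [List.mem_singleton] at hb
          subst hb
          exact hdk ha
        have hv' : ∀ p ∈ acc'.items, p.2 = (PySem.Dict.ofList (groups.getD p.1 [])).items := by
          intro p hp
          rw [hitems] at hp
          rcases List.mem_append.mp hp with h | h
          · exact hv p h
          · simp only [List.mem_singleton] at h; subst h; rfl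
        have hadd : PySem.Set.add acc.keys d = acc.keys ++ [d] := by
          simp [PySem.Set.add, PySem.Set.contains, hdk]
        simp only [List.foldl_cons, hc, if_true, pvEmit, hseen, Bool.not_false, Bool.and_true]
        rw [ih acc' hnd' hv', hitems, hkeys, ← hadd]
        simp
    · have hc' : PySem.Str.isIn keep_key d = false := by simpa using hc
      simp only [List.foldl_cons, hc', pvEmit, Bool.false_and]
      exact ih acc hnd hv

-- ===== VERDICT (by name: the statement is the Claim_ definition above) =====
theorem sort_pods_by_deployment_spec : Claim_equal_sort_pods_by_deployment := by
  intro pods deployment_names keep_key _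
  unfold Spec_sort_pods_by_deployment sort_pods_by_deployment sort_pods_by_deployment_alt
  simp only [pv_inner, ← pv_bucket]
  rw [pv_outer _ _ _ _ (by simp [PySem.Dict.empty, PySem.Dict.keys])
        (by simp [PySem.Dict.empty])]
  simp [PySem.Dict.empty, PySem.Dict.keys, PySem.Set.empty]
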